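-- pv_equiv track=rewrite | github.com/Ashiq-am/Path-of-Python | 3.Data Types/Arrays Set 1 and Set 2/Prefix/Check if a string can be converted to another given string by removal of a substring/Check if a string can be converted to another given string by removal of a substring.py | make_string_S_to_T
-- ===== SOURCE A (Python) =====
-- def make_string_S_to_T(S, T):
--     # Check if S can be converted to T by
--     # removing at most one substring from S
--     possible = False
--
--     # Stores length of string T
--     M = len(T)
--
--     # Stores length of string S
--     N = len(S)
--
--     # Iterate over the range [0, M - 1]
--     for i in range(0, M + 1):
--
--         # Stores Length of the substring
--         # S[0], ..., S[i]
--         prefix_length = i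
--
--         # Stores Length of the substring
--         # S[0], ..., S[i]
--         suffix_length = M - i
--
--         # Stores prefix substring
--         prefix = S[:prefix_length]
--
--         # Stores suffix substring
--         suffix = S[N - suffix_length:N]
--
--         # Checking if prefix+suffix == T
--         if (prefix + suffix == T):
--             possible = True
--             break
--
--     if (possible):
--         return "YES"
--     else:
--         return "NO"
-- ===== SOURCE B (Python) =====
-- def make_string_S_to_T(S, T):
--     # Linear check: T must split into a prefix of S and a disjoint suffix of S,
--     # i.e. (longest common prefix) + (longest common suffix) >= len(T), with len(T) <= len(S).
--     if len(T) > len(S):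
--         return "NO"
--     p = 0
--     for a, b in zip(S, T):
--         if a != b:
--             break
--         p += 1
--     q = 0
--     for a, b in zip(reversed(S), reversed(T)):
--         if a != b:
--             break
--         q += 1
--     return "YES" if p + q >= len(T) else "NO"
-- ===== Notes on version B (the rewrite author's own statement) =====
-- stated objective: faster
-- what changed: Replaces A's loop over all M+1 split points, each building and comparing a fresh length-M string (O(M^2)), by one linear scan computing the longest common prefix and suffix and testing p+q>=len(T), rejecting len(T)>len(S) outright.
-- intended difference: When T is longer than S but T equals S with some block S[i-d:i] duplicated (d=len(T)-len(S)), A's prefix and suffix windows overlap inside S and it returns 'YES' although no removal from S can yield a longer string; B returns the intended 'NO'. — e.g. on make_string_S_to_T("a", "aa"): A returns "YES", B returns "NO"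
import Mathlib
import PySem

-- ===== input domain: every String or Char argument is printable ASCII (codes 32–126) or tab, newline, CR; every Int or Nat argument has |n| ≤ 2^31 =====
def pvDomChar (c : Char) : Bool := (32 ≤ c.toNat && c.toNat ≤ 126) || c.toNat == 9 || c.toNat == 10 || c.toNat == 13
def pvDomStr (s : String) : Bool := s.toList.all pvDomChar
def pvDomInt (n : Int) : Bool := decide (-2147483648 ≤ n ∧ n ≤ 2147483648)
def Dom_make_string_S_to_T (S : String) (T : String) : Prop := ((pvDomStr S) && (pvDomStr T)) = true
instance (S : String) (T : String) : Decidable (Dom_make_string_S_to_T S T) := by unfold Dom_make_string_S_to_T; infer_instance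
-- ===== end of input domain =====

-- B replaces A's quadratic try-every-split loop by one linear common-prefix/common-suffix scan;
-- on the degenerate inputs where T is longer than S (see D_ below) B returns the intended "NO".


-- ===== PORT A =====
-- A's loop 'for i in range(0, M+1): … if prefix+suffix == T: break' with the early break,
-- on the code-point lists (PySem.Chars string slicing IS PySem.List slicing on .toList).
def aLoop (s t : List Char) (N M : Int) : List Int → Bool
  | [] => false
  | i :: rest =>
      let prefix_length := i
      let suffix_length := M - i
      let pre := PySem.List.slice s none (some prefix_length)       -- S[:prefix_length]
      let suf := PySem.List.slice s (some (N - suffix_length)) (some N)  -- S[N-suffix_length:N]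
      if pre ++ suf = t then true else aLoop s t N M rest

def make_string_S_to_T (S : String) (T : String) : String :=
  let M : Int := PySem.Str.len T
  let N : Int := PySem.Str.len S
  if aLoop S.toList T.toList N M (PySem.List.pyRange 0 (M + 1) 1) then "YES" else "NO"

-- ===== PORT B =====
-- 'for a, b in zip(S, T): if a != b: break; p += 1'  — the longest common prefix length.
def commonPrefixLen : List Char → List Char → Nat
  | a :: s, b :: t => if a = b then commonPrefixLen s t + 1 else 0
  | _, _ => 0

def make_string_S_to_T_alt (S : String) (T : String) : String :=
  if S.toList.length < T.toList.length then "NO"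
  else
    let p := commonPrefixLen S.toList T.toList
    let q := commonPrefixLen S.toList.reverse T.toList.reverse
    if T.toList.length ≤ p + q then "YES" else "NO"

-- ===== PRECONDITION & SPEC =====
-- When T is longer than S but T equals S with some block S[i-d:i] duplicated (d = len(T)-len(S)),
-- A's overlapping prefix/suffix windows make it return "YES" although no removal from S can
-- produce a longer string; B returns the intended "NO".
def D_make_string_S_to_T (S : String) (T : String) : Prop :=
  S.toList.length < T.toList.length ∧
  ∃ k ∈ Finset.range (S.toList.length + 1),
    T.toList.length - S.toList.length ≤ k ∧
    T.toList = S.toList.take k ++ S.toList.drop (k - (T.toList.length - S.toList.length))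
instance (S : String) (T : String) : Decidable (D_make_string_S_to_T S T) := by
  unfold D_make_string_S_to_T; infer_instance

def Spec_make_string_S_to_T (S : String) (T : String) (out : String) : Prop :=
  ¬ D_make_string_S_to_T S T → out = make_string_S_to_T_alt S T
instance (S : String) (T : String) (out : String) : Decidable (Spec_make_string_S_to_T S T out) := by
  unfold Spec_make_string_S_to_T; infer_instance

def pvDiffWitness_make_string_S_to_T : String × String := ("a", "aa")
def pvDiffWitnessOut_make_string_S_to_T : String × String := ("YES", "NO")

-- ===== CLAIM (what is proved, stated in full; the proofs are below) =====
def Claim_unchanged_make_string_S_to_T : Prop := ∀ (S : String) (T : String), Dom_make_string_S_to_T S T → Spec_make_string_S_to_T S T (make_string_S_to_T S T)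
def Claim_changed_make_string_S_to_T : Prop := Dom_make_string_S_to_T (pvDiffWitness_make_string_S_to_T.1) (pvDiffWitness_make_string_S_to_T.2) ∧ D_make_string_S_to_T (pvDiffWitness_make_string_S_to_T.1) (pvDiffWitness_make_string_S_to_T.2) ∧ make_string_S_to_T (pvDiffWitness_make_string_S_to_T.1) (pvDiffWitness_make_string_S_to_T.2) = pvDiffWitnessOut_make_string_S_to_T.1 ∧ make_string_S_to_T_alt (pvDiffWitness_make_string_S_to_T.1) (pvDiffWitness_make_string_S_to_T.2) = pvDiffWitnessOut_make_string_S_to_T.2 ∧ pvDiffWitnessOut_make_string_S_to_T.1 ≠ pvDiffWitnessOut_make_string_S_to_T.2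
def Claim_exact_make_string_S_to_T : Prop := ∀ (S : String) (T : String), Dom_make_string_S_to_T S T → D_make_string_S_to_T S T → make_string_S_to_T S T ≠ make_string_S_to_T_alt S T

-- ===== LEMMAS AND PROOFS =====

-- the break-loop is an existential over the list
theorem aLoop_eq_true_iff (s t : List Char) (N M : Int) (l : List Int) :
    aLoop s t N M l = true ↔
      ∃ i ∈ l, PySem.List.slice s none (some i) ++ PySem.List.slice s (some (N - (M - i))) (some N) = t := by
  induction l with
  | nil => simp [aLoop]
  | cons i rest ih =>
      simp only [aLoop]
      split_ifs with h
      · simp [h]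
      · simp [ih, h]

theorem commonPrefixLen_le_left (s t : List Char) : commonPrefixLen s t ≤ s.length := by
  induction s generalizing t with
  | nil => simp [commonPrefixLen]
  | cons a s ih =>
      cases t with
      | nil => simp [commonPrefixLen]
      | cons b t =>
          simp only [commonPrefixLen, List.length_cons]
          split_ifs with h
          · exact Nat.succ_le_succ (ih t)
          · omega

theorem take_eq_take_of_le_cpl (s t : List Char) (k : Nat)
    (hk : k ≤ commonPrefixLen s t) : s.take k = t.take k := by
  induction s generalizing t k with
  | nil =>
      cases t <;> simp [commonPrefixLen] at hk <;> simp [hk]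
  | cons a s ih =>
      cases t with
      | nil => simp [commonPrefixLen] at hk; simp [hk]
      | cons b t =>
          simp only [commonPrefixLen] at hk
          split_ifs at hk with h
          · cases k with
            | zero => simp
            | succ k => simp [h, List.take_succ_cons, ih t k (Nat.le_of_succ_le_succ hk)]
          · interval_cases k
            simp

theorem le_cpl_of_take_eq (s t : List Char) (k : Nat)
    (hks : k ≤ s.length) (hkt : k ≤ t.length) (h : s.take k = t.take k) :
    k ≤ commonPrefixLen s t := by
  induction s generalizing t k with
  | nil => simp at hks; omega
  | cons a s ih =>
      cases k with
      | zero => exact Nat.zero_le _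
      | succ k =>
          cases t with
          | nil => simp at hkt
          | cons b t =>
              simp only [List.take_succ_cons, List.cons.injEq] at h
              simp only [commonPrefixLen, h.1]
              exact Nat.succ_le_succ (ih t k (by simpa using hks) (by simpa using hkt) h.2)

-- A's loop condition at a nonnegative suffix start, in Nat terms
theorem cond_natCast (s : List Char) (k j : Nat) :
    PySem.List.slice s none (some (k : Int)) ++ PySem.List.slice s (some (j : Int)) (some (s.length : Int)) =
      s.take k ++ s.drop j := by
  rw [PySem.List.slice_to_natCast, PySem.List.slice_natCast]
  congr 1
  exact List.take_of_length_le (by simp)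

-- B's test in terms of an explicit split point (the core correspondence, M ≤ N)
theorem exists_split_iff_cpl (s t : List Char) (hMN : t.length ≤ s.length) :
    (∃ k ≤ t.length, s.take k ++ s.drop (s.length - (t.length - k)) = t) ↔
      t.length ≤ commonPrefixLen s t + commonPrefixLen s.reverse t.reverse := by
  set N := s.length with hN
  set M := t.length with hM
  constructor
  · rintro ⟨k, hkM, hsplit⟩
    have hlen1 : (s.take k).length = k := by simp; omega
    have htk : t.take k = s.take k := by
      have h2 := congrArg (List.take k) hsplit
      rw [List.take_append_of_le_length (by omega), List.take_take, min_self] at h2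
      exact h2.symm
    have hdk : t.drop k = s.drop (N - (M - k)) := by
      have h2 := congrArg (List.drop k) hsplit
      rw [List.drop_append_of_le_length (by omega)] at h2
      simp only [List.drop_take, Nat.sub_self, List.take_zero, List.nil_append] at h2
      exact h2.symm
    have h1 : k ≤ commonPrefixLen s t :=
      le_cpl_of_take_eq s t k (by omega) (by omega) htk.symm
    have h2 : M - k ≤ commonPrefixLen s.reverse t.reverse := by
      apply le_cpl_of_take_eq s.reverse t.reverse (M - k) (by simp; omega) (by simp; omega)
      have e1 : s.reverse.take (M - k) = (s.drop (N - (M - k))).reverse := by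
        rw [List.reverse_drop]
        congr 1
        omega
      have e2 : t.reverse.take (M - k) = (t.drop k).reverse := by
        rw [List.reverse_drop, hM]
      rw [e1, e2, hdk]
    omega
  · intro hpq
    have hp := commonPrefixLen_le_left s t
    refine ⟨min (commonPrefixLen s t) M, by omega, ?_⟩
    set k := min (commonPrefixLen s t) M with hk
    have htk : s.take k = t.take k :=
      take_eq_take_of_le_cpl s t k (by omega)
    have hq : M - k ≤ commonPrefixLen s.reverse t.reverse := by omega
    have hdk : s.drop (N - (M - k)) = t.drop k := by
      have hrev : (s.drop (N - (M - k))).reverse = (t.drop k).reverse := by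
        rw [List.reverse_drop, List.reverse_drop]
        have e1 : s.length - (N - (M - k)) = M - k := by omega
        have e2 : t.length - k = M - k := by omega
        rw [e1, e2]
        exact take_eq_take_of_le_cpl s.reverse t.reverse (M - k) hq
      exact List.reverse_injective hrev
    rw [htk, hdk, List.take_append_drop]

-- any matching iteration of A's loop with len(S) < len(T) lands inside D_
theorem match_gives_D (s t : List Char) (i : Int)
    (hi0 : 0 ≤ i) (hiM : i < (t.length : Int) + 1) (hNM : s.length < t.length)
    (h : PySem.List.slice s none (some i) ++
          PySem.List.slice s (some ((s.length : Int) - ((t.length : Int) - i))) (some (s.length : Int)) = t) :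
    ∃ k ≤ s.length, t.length - s.length ≤ k ∧
      t = s.take k ++ s.drop (k - (t.length - s.length)) := by
  set N := s.length with hN
  set M := t.length with hM
  obtain ⟨k, rfl⟩ : ∃ k : Nat, i = (k : Int) := ⟨i.toNat, (Int.toNat_of_nonneg hi0).symm⟩
  have hkM : k ≤ M := by exact_mod_cast Int.lt_add_one_iff.mp hiM
  have hlen := congrArg List.length h
  by_cases hstart : (M : Int) - (k : Int) ≤ (N : Int)
  · -- nonnegative suffix start: the match is exactly a D_ witness
    have harith : (N : Int) - ((M : Int) - (k : Int)) = ((N - (M - k) : Nat) : Int) := by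
      omega
    rw [harith, cond_natCast] at h
    have hlen2 := congrArg List.length h
    rw [List.length_append, List.length_take, List.length_drop] at hlen2
    have hkN : k ≤ N := by
      -- otherwise the lengths cannot agree
      by_contra hkN
      omega
    refine ⟨k, hkN, by omega, ?_⟩
    have e : k - (M - N) = N - (M - k) := by omega
    rw [e]
    exact h.symm
  · -- negative suffix start: the concatenation is strictly shorter than T
    exfalso
    rw [List.length_append, PySem.List.length_slice] at hlen
    have hto : PySem.List.clampIdx s.length (s.length : Int) = N := by
      rw [PySem.List.clampIdx_natCast]; omega
    have hfrom : PySem.List.clampIdx s.length ((N : Int) - ((M : Int) - (k : Int))) =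
        N - (M - k - N) := by
      have he : (N : Int) - ((M : Int) - (k : Int)) = -(((M - k - N : Nat) : Int)) := by
        omega
      rw [he, PySem.List.clampIdx_neg_natCast]
      omega
    have hpre : (PySem.List.slice s none (some ((k : Nat) : Int))).length = min k N := by
      rw [PySem.List.slice_to_natCast, List.length_take]
    rw [hto, hfrom, hpre] at hlen
    omega

theorem A_eq_yes_iff (S T : String) :
    make_string_S_to_T S T = "YES" ↔
      aLoop S.toList T.toList (S.toList.length : Int) (T.toList.length : Int)
        (PySem.List.pyRange 0 ((T.toList.length : Int) + 1) 1) = true := by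
  unfold make_string_S_to_T
  simp only [PySem.Str.len_eq, String.length_toList]
  split_ifs with h <;> simp [h]

-- ===== VERDICT (by name: the statement is the Claim_ definition above) =====
theorem make_string_S_to_T_spec : Claim_unchanged_make_string_S_to_T := by
  intro S T _ hD
  by_cases hMN : S.toList.length < T.toList.length
  · -- T longer than S, outside D_: both return "NO"
    have hA : make_string_S_to_T S T ≠ "YES" := by
      intro hyes
      rw [A_eq_yes_iff, aLoop_eq_true_iff] at hyes
      obtain ⟨i, hmem, hcond⟩ := hyes
      rw [PySem.List.mem_pyRange_one] at hmem
      apply hD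
      obtain ⟨k, hkN, hkd, hteq⟩ := match_gives_D S.toList T.toList i hmem.1 hmem.2 hMN hcond
      exact ⟨hMN, k, Finset.mem_range.mpr (by omega), hkd, hteq⟩
    unfold make_string_S_to_T make_string_S_to_T_alt at *
    rw [if_pos hMN]
    simp only [PySem.Str.len_eq, String.length_toList] at hA ⊢
    split_ifs with hl
    · simp [hl] at hA
    · rfl
  · -- len(T) ≤ len(S): A's split search agrees with B's prefix+suffix test
    have key := exists_split_iff_cpl S.toList T.toList (by omega)
    have hAiff : make_string_S_to_T S T = "YES" ↔
        T.toList.length ≤ commonPrefixLen S.toList T.toList +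
          commonPrefixLen S.toList.reverse T.toList.reverse := by
      rw [A_eq_yes_iff, aLoop_eq_true_iff, ← key]
      constructor
      · rintro ⟨i, hmem, hcond⟩
        rw [PySem.List.mem_pyRange_one] at hmem
        obtain ⟨k, rfl⟩ : ∃ k : Nat, i = (k : Int) :=
          ⟨i.toNat, (Int.toNat_of_nonneg hmem.1).symm⟩
        have hkM : k ≤ T.toList.length := by
          have := hmem.2; omega
        have harith : (S.toList.length : Int) - ((T.toList.length : Int) - (k : Int)) =
            ((S.toList.length - (T.toList.length - k) : Nat) : Int) := by omega
        rw [harith, cond_natCast] at hcond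
        exact ⟨k, hkM, hcond⟩
      · rintro ⟨k, hkM, hsplit⟩
        refine ⟨(k : Int), PySem.List.mem_pyRange_one.mpr ⟨by omega, by omega⟩, ?_⟩
        have harith : (S.toList.length : Int) - ((T.toList.length : Int) - (k : Int)) =
            ((S.toList.length - (T.toList.length - k) : Nat) : Int) := by omega
        rw [harith, cond_natCast]
        exact hsplit
    have hAno : make_string_S_to_T S T = "YES" ∨ make_string_S_to_T S T = "NO" := by
      by_cases hb : aLoop S.toList T.toList ((S.length : Int)) ((T.length : Int))
          (PySem.List.pyRange 0 ((T.length : Int) + 1) 1) = true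
      · left; simp [make_string_S_to_T, hb]
      · right; simp [make_string_S_to_T, hb]
    unfold make_string_S_to_T_alt
    rw [if_neg hMN]
    simp only
    split_ifs with hcase
    · exact hAiff.mpr hcase
    · rcases hAno with h | h
      · exact absurd (hAiff.mp h) hcase
      · exact h

theorem make_string_S_to_T_changed : Claim_changed_make_string_S_to_T := by
  unfold Claim_changed_make_string_S_to_T; decide

theorem make_string_S_to_T_tight : Claim_exact_make_string_S_to_T := by
  intro S T _ hD
  obtain ⟨hNM, k, hkmem, hkd, hteq⟩ := hD
  have hkN : k ≤ S.toList.length := by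
    have := Finset.mem_range.mp hkmem; omega
  have hA : make_string_S_to_T S T = "YES" := by
    rw [A_eq_yes_iff, aLoop_eq_true_iff]
    refine ⟨(k : Int), PySem.List.mem_pyRange_one.mpr ⟨by omega, by omega⟩, ?_⟩
    have harith : (S.toList.length : Int) - ((T.toList.length : Int) - (k : Int)) =
        ((k - (T.toList.length - S.toList.length) : Nat) : Int) := by omega
    rw [harith, cond_natCast]
    exact hteq.symm
  have hB : make_string_S_to_T_alt S T = "NO" := by
    unfold make_string_S_to_T_alt
    rw [if_pos hNM]
  rw [hA, hB]
  decide
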